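-- pv_equiv track=rewrite | github.com/dwydeven/RIT_pd3 | trader.py | get_processed_interval
-- ===== SOURCE A (Python) =====
-- def get_processed_interval(geb_estimates, ub_estimates):
--     """
--     Takes the estimates and returns the processed intervals for each ticker
--     The processed interval takes the maximum of the minimums and the minimum of the maximums for each ticker
--     """
--     if geb_estimates == []:
--         geb_minimum = 20
--         geb_maximum = 30
--     else:
--         geb_minimum = max(max([estimate[0] for estimate in geb_estimates]), 20)
--         geb_maximum = min(min([estimate[1] for estimate in geb_estimates]), 30)
--
--     if ub_estimates == []:
--         ub_minimum = 40
--         ub_maximum = 60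
--     else:
--         ub_minimum = max(max([estimate[0] for estimate in ub_estimates]), 40)
--         ub_maximum = min(min([estimate[1] for estimate in ub_estimates]), 60)
--
--     return [geb_minimum, geb_maximum], [ub_minimum, ub_maximum]
-- ===== SOURCE B (Python) =====
-- def get_processed_interval(geb_estimates, ub_estimates):
--     def bounds(estimates, default):
--         rows = estimates + [default]
--         starts = sorted(row[0] for row in rows)
--         ends = sorted(row[1] for row in rows)
--         return [starts[-1], ends[0]]
--     return bounds(geb_estimates, [20, 30]), bounds(ub_estimates, [40, 60])
-- ===== Notes on version B (the rewrite author's own statement) =====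
-- stated objective: alternative
-- what changed: Replaces the comprehensions-plus-nested-max/min-and-empty-branch structure by a sort-and-pick algorithm: the default interval is appended as an extra row, the start and end columns are sorted, and the bounds are the last start and the first end; no max/min calls and no empty-case branches remain.
import Mathlib
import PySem

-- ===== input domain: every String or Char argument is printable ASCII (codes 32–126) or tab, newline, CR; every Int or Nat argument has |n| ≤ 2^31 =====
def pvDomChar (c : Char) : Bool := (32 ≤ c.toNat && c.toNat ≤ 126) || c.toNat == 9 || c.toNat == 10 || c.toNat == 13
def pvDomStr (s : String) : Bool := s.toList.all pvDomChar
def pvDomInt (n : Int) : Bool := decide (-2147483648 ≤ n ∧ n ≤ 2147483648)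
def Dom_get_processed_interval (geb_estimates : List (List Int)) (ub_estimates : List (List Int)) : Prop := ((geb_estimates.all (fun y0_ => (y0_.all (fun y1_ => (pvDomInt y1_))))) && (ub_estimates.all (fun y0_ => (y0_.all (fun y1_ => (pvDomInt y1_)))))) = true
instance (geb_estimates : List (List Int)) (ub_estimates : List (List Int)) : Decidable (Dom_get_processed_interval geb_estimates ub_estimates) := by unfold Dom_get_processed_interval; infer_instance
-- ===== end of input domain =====

-- B replaces A's comprehensions + nested max/min reductions and the two empty-list
-- branches by a sort-and-pick algorithm: append the default interval as a row, sort
-- the start and end columns, take the last start and the first end (alternative).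


-- ===== PORT A =====
-- estimate[i] is ported by PySem.List.pyGet?; the .getD 0 default is never hit under
-- Pre_get_processed_interval (every estimate has length ≥ 2), and max(l)/min(l) on the
-- nonempty comprehension results are PySem.List.max?/min? with identity key (.getD 0 unreachable).
def get_processed_interval (geb_estimates : List (List Int)) (ub_estimates : List (List Int)) : List Int × List Int :=
  let geb_minimum : Int :=
    if geb_estimates = [] then 20
    else max ((PySem.List.max? (geb_estimates.map (fun estimate => (PySem.List.pyGet? estimate 0).getD 0)) (fun y => y)).getD 0) 20
  let geb_maximum : Int :=
    if geb_estimates = [] then 30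
    else min ((PySem.List.min? (geb_estimates.map (fun estimate => (PySem.List.pyGet? estimate 1).getD 0)) (fun y => y)).getD 0) 30
  let ub_minimum : Int :=
    if ub_estimates = [] then 40
    else max ((PySem.List.max? (ub_estimates.map (fun estimate => (PySem.List.pyGet? estimate 0).getD 0)) (fun y => y)).getD 0) 40
  let ub_maximum : Int :=
    if ub_estimates = [] then 60
    else min ((PySem.List.min? (ub_estimates.map (fun estimate => (PySem.List.pyGet? estimate 1).getD 0)) (fun y => y)).getD 0) 60
  ([geb_minimum, geb_maximum], [ub_minimum, ub_maximum])

-- ===== PORT B =====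
-- sorted(...) is PySem.List.sorted with identity key; starts[-1]/ends[0] are
-- pyGet? (-1)/0, whose .getD 0 default is unreachable (rows is never empty).
def pvBounds (estimates : List (List Int)) (dflt : List Int) : List Int :=
  let rows := estimates ++ [dflt]
  let starts := PySem.List.sorted (rows.map (fun row => (PySem.List.pyGet? row 0).getD 0)) (fun y => y) false
  let ends := PySem.List.sorted (rows.map (fun row => (PySem.List.pyGet? row 1).getD 0)) (fun y => y) false
  [(PySem.List.pyGet? starts (-1)).getD 0, (PySem.List.pyGet? ends 0).getD 0]

def get_processed_interval_alt (geb_estimates : List (List Int)) (ub_estimates : List (List Int)) : List Int × List Int :=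
  (pvBounds geb_estimates [20, 30], pvBounds ub_estimates [40, 60])

-- ===== PRECONDITION & SPEC =====
-- Pre_ excludes exactly the inputs where Python A raises IndexError: an estimate with
-- fewer than two entries (estimate[0]/estimate[1] out of range).
def Pre_get_processed_interval (geb_estimates : List (List Int)) (ub_estimates : List (List Int)) : Prop :=
  (∀ e ∈ geb_estimates, 2 ≤ e.length) ∧ (∀ e ∈ ub_estimates, 2 ≤ e.length)
instance (geb_estimates : List (List Int)) (ub_estimates : List (List Int)) : Decidable (Pre_get_processed_interval geb_estimates ub_estimates) := by unfold Pre_get_processed_interval; infer_instance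
def pvWitness_get_processed_interval : List (List Int) × List (List Int) := ([[22, 28], [19, 40]], [[45, 55]])

def Spec_get_processed_interval (geb_estimates : List (List Int)) (ub_estimates : List (List Int)) (out : List Int × List Int) : Prop := out = get_processed_interval_alt geb_estimates ub_estimates
instance (geb_estimates : List (List Int)) (ub_estimates : List (List Int)) (out : List Int × List Int) : Decidable (Spec_get_processed_interval geb_estimates ub_estimates out) := by unfold Spec_get_processed_interval; infer_instance

-- ===== CLAIM (what is proved, stated in full; the proofs are below) =====
def Claim_equal_get_processed_interval : Prop := ∀ (geb_estimates : List (List Int)) (ub_estimates : List (List Int)), Dom_get_processed_interval geb_estimates ub_estimates → Pre_get_processed_interval geb_estimates ub_estimates → Spec_get_processed_interval geb_estimates ub_estimates (get_processed_interval geb_estimates ub_estimates)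

-- ===== LEMMAS AND PROOFS =====

-- In a (·≤·)-pairwise list every element is ≤ the last element.
theorem pvLe_getLast (l : List Int) (hp : l.Pairwise (· ≤ ·)) (h : l ≠ []) :
    ∀ y ∈ l, y ≤ l.getLast h := by
  induction l with
  | nil => simp
  | cons a t ih =>
    intro y hy
    rcases List.mem_cons.1 hy with rfl | hyt
    · rcases eq_or_ne t [] with rfl | ht
      · simp
      · rw [List.getLast_cons ht]
        exact (List.pairwise_cons.1 hp).1 _ (List.getLast_mem ht)
    · have ht : t ≠ [] := List.ne_nil_of_mem hyt
      rw [List.getLast_cons ht]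
      exact ih (List.pairwise_cons.1 hp).2 ht y hyt

-- starts[-1] of the sorted list is the running max of the unsorted list.
theorem pvSorted_last_max (x : Int) (t : List Int) :
    (PySem.List.pyGet? (PySem.List.sorted (x :: t) (fun y => y) false) (-1)).getD 0
      = t.foldl max x := by
  have hsne : PySem.List.sorted (x :: t) (fun y => y) false ≠ [] := by
    intro h0
    exact (List.cons_ne_nil x t) ((PySem.List.sorted_eq_nil_iff _ _ _).1 h0)
  rw [PySem.List.pyGet?_neg_one, List.getLast?_eq_some_getLast hsne, Option.getD_some]
  have hpair : (PySem.List.sorted (x :: t) (fun y => y) false).Pairwise (· ≤ ·) := by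
    have := PySem.List.sorted_pairwise (xs := x :: t) (key := fun y => y)
    simpa using this
  have hlast_mem : (PySem.List.sorted (x :: t) (fun y => y) false).getLast hsne ∈ x :: t :=
    (PySem.List.mem_sorted _ _ _ _).1 (List.getLast_mem hsne)
  have hf := PySem.List.le_foldl_max t x
  have hfmem : t.foldl max x ∈ x :: t := by
    rcases PySem.List.foldl_max_mem t x with h | h
    · rw [h]; exact List.mem_cons_self
    · exact List.mem_cons_of_mem _ h
  apply le_antisymm
  · rcases List.mem_cons.1 hlast_mem with h | h
    · rw [h]; exact hf.1
    · exact hf.2 _ h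
  · exact pvLe_getLast _ hpair hsne _ ((PySem.List.mem_sorted _ _ _ _).2 hfmem)

-- ends[0] of the sorted list is the running min of the unsorted list.
theorem pvSorted_head_min (x : Int) (t : List Int) :
    (PySem.List.pyGet? (PySem.List.sorted (x :: t) (fun y => y) false) 0).getD 0
      = t.foldl min x := by
  obtain ⟨m, r, hsr⟩ : ∃ m r, PySem.List.sorted (x :: t) (fun y => y) false = m :: r := by
    cases h : PySem.List.sorted (x :: t) (fun y => y) false with
    | nil => exact absurd ((PySem.List.sorted_eq_nil_iff _ _ _).1 h) (List.cons_ne_nil x t)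
    | cons m r => exact ⟨m, r, rfl⟩
  rw [hsr, PySem.List.pyGet?_zero_cons, Option.getD_some]
  have hhead_le : ∀ y ∈ x :: t, m ≤ y := by
    have := PySem.List.key_head_sorted_le (xs := x :: t) (key := fun y => y) hsr
    simpa using this
  have hhead_mem : m ∈ x :: t := (PySem.List.mem_sorted _ _ _ _).1 (hsr ▸ List.mem_cons_self)
  have hf := PySem.List.foldl_min_le t x
  have hfmem : t.foldl min x ∈ x :: t := by
    rcases PySem.List.foldl_min_mem t x with h | h
    · rw [h]; exact List.mem_cons_self
    · exact List.mem_cons_of_mem _ h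
  apply le_antisymm
  · exact hhead_le _ hfmem
  · rcases List.mem_cons.1 hhead_mem with h | h
    · rw [h]; exact hf.1
    · exact hf.2 _ h

-- pvBounds rewritten as A's branch expressions.
theorem pvBounds_eq (l : List (List Int)) (a b : Int) :
    pvBounds l [a, b] =
      [ if l = [] then a
        else max ((PySem.List.max? (l.map (fun e => (PySem.List.pyGet? e 0).getD 0)) (fun y => y)).getD 0) a,
        if l = [] then b
        else min ((PySem.List.min? (l.map (fun e => (PySem.List.pyGet? e 1).getD 0)) (fun y => y)).getD 0) b ] := by
  have h0 : (PySem.List.pyGet? [a, b] 0).getD 0 = a := by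
    simp [PySem.List.pyGet?, PySem.List.pyIdx?]
  have h1 : (PySem.List.pyGet? [a, b] 1).getD 0 = b := by
    simp [PySem.List.pyGet?, PySem.List.pyIdx?]
  rcases l with _ | ⟨e, t⟩
  · unfold pvBounds
    simp only [List.nil_append, List.map_cons, List.map_nil, h0, h1,
      pvSorted_last_max, pvSorted_head_min, List.foldl_nil]
    simp
  · unfold pvBounds
    simp only [List.cons_append, List.map_cons, List.map_append, List.map_nil, h0, h1,
      pvSorted_last_max, pvSorted_head_min, List.foldl_append, List.foldl_cons, List.foldl_nil,
      PySem.List.max?_id_cons, PySem.List.min?_id_cons, Option.getD_some]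
    simp

theorem get_processed_interval_spec : Claim_equal_get_processed_interval := by
  intro g u _ _
  show get_processed_interval g u = get_processed_interval_alt g u
  unfold get_processed_interval get_processed_interval_alt
  rw [pvBounds_eq, pvBounds_eq]
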